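-- pv_equiv track=rewrite | github.com/MrBrantCode/unitest_baseline | mut_generate/mist_train_cf/cf_28323/solution.py | countValidHTMLTags
-- ===== SOURCE A (Python) =====
-- def countValidHTMLTags(htmlString):
--     stack = []
--     count = 0
--     i = 0
--     while i < len(htmlString):
--         if htmlString[i] == '<':
--             tag = ""
--             i += 1
--             while i < len(htmlString) and htmlString[i] != '>':
--                 tag += htmlString[i]
--                 i += 1
--             if tag and tag[0] != '/':
--                 stack.append(tag)
--             elif tag and tag[0] == '/':
--                 if stack and stack[-1] == tag[1:]:
--                     stack.pop()
--                     count += 1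
--             i += 1
--         else:
--             i += 1
--     return count
-- ===== SOURCE B (Python) =====
-- import re
--
-- def countValidHTMLTags(htmlString):
--     # tokenize: each token is the text between '<' and the next '>' (or end of string)
--     tokens = [m.group(1) for m in re.finditer(r'<([^>]*)(?:>|$)', htmlString)]
--     stack = []
--     count = 0
--     for tok in tokens:
--         if not tok:
--             continue
--         if tok[0] == '/':
--             if stack and stack[-1] == tok[1:]:
--                 stack.pop()
--                 count += 1
--         else:
--             stack.append(tok)
--     return count
-- ===== Notes on version B (the rewrite author's own statement) =====
-- stated objective: idiomatic
-- what changed: A's single interleaved index scan (reading tag characters inline while matching) is replaced by a two-phase decomposition: one re.finditer pass tokenizes every tag text between an opening angle bracket and the next closing one (or end of string), then a separate stack-matching pass runs over the token list.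
import Mathlib
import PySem

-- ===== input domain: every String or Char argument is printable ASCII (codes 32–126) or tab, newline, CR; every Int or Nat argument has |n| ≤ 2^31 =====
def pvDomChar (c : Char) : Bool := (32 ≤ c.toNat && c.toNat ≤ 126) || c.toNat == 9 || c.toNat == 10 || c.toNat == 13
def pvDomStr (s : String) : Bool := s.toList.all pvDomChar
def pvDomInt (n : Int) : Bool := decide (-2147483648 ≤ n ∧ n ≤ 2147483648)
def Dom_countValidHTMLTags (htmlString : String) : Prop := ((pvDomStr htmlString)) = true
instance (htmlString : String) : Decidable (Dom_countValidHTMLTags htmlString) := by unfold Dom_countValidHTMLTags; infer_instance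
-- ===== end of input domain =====

-- B replaces A's single interleaved index scan with a tokenize-then-match decomposition
-- (first collect all '<…>' tag texts, then a separate stack pass over the token list); objective: idiomatic.

-- ===== PORT A =====
-- inner while loop of A: collect chars until '>' (tag accumulated left-to-right), return (tag, rest after the '>')
def pvReadTagA : List Char → List Char × List Char
  | [] => ([], [])
  | c :: rest =>
    if c = '>' then ([], rest)
    else
      let p := pvReadTagA rest
      (c :: p.1, p.2)

theorem pvReadTagA_len (cs : List Char) : (pvReadTagA cs).2.length ≤ cs.length := by
  induction cs with
  | nil => simp [pvReadTagA]
  | cons c rest ih =>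
    simp only [pvReadTagA]
    split
    · simp
    · simpa using Nat.le_succ_of_le ih

-- A's outer while loop: stack is the Python list with its top at the head
def pvScanA : List Char → List (List Char) → Int → Int
  | [], _, count => count
  | c :: rest, stack, count =>
    if c = '<' then
      let p := pvReadTagA rest
      match p.1 with
      | [] => pvScanA p.2 stack count
      | t0 :: tl =>
        if t0 ≠ '/' then pvScanA p.2 ((t0 :: tl) :: stack) count
        else
          match stack with
          | top :: stk' =>
            if top = tl then pvScanA p.2 stk' (count + 1)
            else pvScanA p.2 (top :: stk') count
          | [] => pvScanA p.2 [] count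
    else pvScanA rest stack count
termination_by cs => cs.length
decreasing_by
  all_goals simp_all
  all_goals exact pvReadTagA_len rest

def countValidHTMLTags (htmlString : String) : Int :=
  pvScanA htmlString.toList [] 0

-- ===== PORT B =====
-- exact port of the regex r'<([^>]*)(?:>|$)': the greedy run of non-'>' chars after '<',
-- then the optional closing '>' is dropped
def pvReadTagB (cs : List Char) : List Char × List Char :=
  (cs.takeWhile (· ≠ '>'), (cs.dropWhile (· ≠ '>')).drop 1)

theorem pvReadTagB_len (cs : List Char) : (pvReadTagB cs).2.length ≤ cs.length := by
  simp only [pvReadTagB]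
  calc ((cs.dropWhile (· ≠ '>')).drop 1).length ≤ (cs.dropWhile (· ≠ '>')).length := by
        simp
    _ ≤ cs.length := List.length_dropWhile_le _ _

-- re.finditer pass: the list of captured groups, leftmost non-overlapping
def pvTokenize : List Char → List (List Char)
  | [] => []
  | c :: rest =>
    if c = '<' then
      let p := pvReadTagB rest
      p.1 :: pvTokenize p.2
    else pvTokenize rest
termination_by cs => cs.length
decreasing_by
  all_goals simp_all
  exact pvReadTagB_len rest

-- second pass: stack matching over the token list (top of stack at the head)
def pvMatchB : List (List Char) → List (List Char) → Int → Int
  | [], _, count => count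
  | t :: ts, stack, count =>
    match t with
    | [] => pvMatchB ts stack count
    | c0 :: name =>
      if c0 = '/' then
        match stack with
        | top :: stk' =>
          if top = name then pvMatchB ts stk' (count + 1)
          else pvMatchB ts (top :: stk') count
        | [] => pvMatchB ts [] count
      else pvMatchB ts ((c0 :: name) :: stack) count

def countValidHTMLTags_alt (htmlString : String) : Int :=
  pvMatchB (pvTokenize htmlString.toList) [] 0

-- ===== PRECONDITION & SPEC =====
def Spec_countValidHTMLTags (htmlString : String) (out : Int) : Prop := out = countValidHTMLTags_alt htmlString
instance (htmlString : String) (out : Int) : Decidable (Spec_countValidHTMLTags htmlString out) := by unfold Spec_countValidHTMLTags; infer_instance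

-- ===== CLAIM (what is proved, stated in full; the proofs are below) =====
def Claim_equal_countValidHTMLTags : Prop := ∀ (htmlString : String), Dom_countValidHTMLTags htmlString → Spec_countValidHTMLTags htmlString (countValidHTMLTags htmlString)

-- ===== LEMMAS AND PROOFS =====

-- the two tag readers agree
theorem readTag_eq (cs : List Char) : pvReadTagA cs = pvReadTagB cs := by
  induction cs with
  | nil => simp [pvReadTagA, pvReadTagB]
  | cons c rest ih =>
    by_cases h : c = '>'
    · simp [pvReadTagA, pvReadTagB, h]
    · simp [pvReadTagA, pvReadTagB, h, ih]

-- the interleaved scan equals the tokenize-then-match decomposition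
theorem scan_eq_match : ∀ (n : ℕ) (cs : List Char), cs.length ≤ n →
    ∀ (stack : List (List Char)) (count : Int),
    pvScanA cs stack count = pvMatchB (pvTokenize cs) stack count := by
  intro n
  induction n with
  | zero =>
    intro cs h
    have : cs = [] := List.eq_nil_of_length_eq_zero (Nat.le_zero.mp h)
    subst this
    intro stack count
    simp [pvScanA, pvTokenize.eq_def, pvMatchB]
  | succ n ih =>
    intro cs h stack count
    match cs with
    | [] => simp [pvScanA, pvTokenize.eq_def, pvMatchB]
    | c :: rest =>
      have hrest : rest.length ≤ n := by simpa using Nat.lt_succ_iff.mp (Nat.lt_of_lt_of_le (by simp) h)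
      by_cases hc : c = '<'
      · subst hc
        have hp : (pvReadTagA rest).2.length ≤ n :=
          le_trans (pvReadTagA_len rest) hrest
        have IH : ∀ (st : List (List Char)) (cnt : Int),
            pvScanA (pvReadTagA rest).2 st cnt = pvMatchB (pvTokenize (pvReadTagA rest).2) st cnt :=
          fun st cnt => ih _ hp st cnt
        rw [pvScanA.eq_def, pvTokenize.eq_def]
        simp only [← readTag_eq, reduceIte]
        match htag : (pvReadTagA rest).1 with
        | [] =>
          simp only [pvMatchB]
          exact IH _ _
        | t0 :: tl =>
          by_cases h0 : t0 = '/'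
          · subst h0
            simp [pvMatchB, IH]
          · simp [pvMatchB, h0, IH]
      · rw [pvScanA.eq_def, pvTokenize.eq_def]
        simp only [if_neg hc]
        exact ih _ hrest _ _

-- ===== VERDICT (by name: the statement is the Claim_ definition above) =====
theorem countValidHTMLTags_spec : Claim_equal_countValidHTMLTags := by
  intro s _
  unfold Spec_countValidHTMLTags countValidHTMLTags countValidHTMLTags_alt
  exact scan_eq_match s.toList.length s.toList le_rfl [] 0
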